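-- pv_equiv track=rewrite | github.com/nemo7474/cyber-security | ECDSA.py | pointAddition
-- ===== SOURCE A (Python) =====
-- def findModularInverse(a, m):
--     for x in range(1, m):
--         if (a * x) % m == 1:
--             return x
--     return -1
--
-- def pointAddition(x1, y1, x2, y2, a, b, mod):
--
-- 	if x1 == x2 and y1 == y2:
-- 		#doubling
-- 		beta = (3*x1*x1 + a) * (findModularInverse(2*y1, mod))
--
--
--
-- 	else:
-- 		#point addition
-- 		beta = (y2 - y1)*(findModularInverse((x2 - x1), mod))
--
-- 	x3 = beta*beta - x1 - x2
-- 	y3 = beta*(x1 - x3) - y1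
--
-- 	x3 = x3 % mod
-- 	y3 = y3 % mod
--
-- 	while(x3 < 0):
-- 		x3 = x3 + mod
--
-- 	while(y3 < 0):
-- 		y3 = y3 + mod
--
-- 	return x3, y3
-- ===== SOURCE B (Python) =====
-- def _modularInverseOrMinusOne(v, m):
--     # extended Euclidean algorithm; returns the inverse of v mod m in [1, m-1],
--     # or -1 when m <= 1 or v is not invertible mod m (matching findModularInverse).
--     if m <= 1:
--         return -1
--     old_r, r = v % m, m
--     old_s, s = 1, 0
--     while r != 0:
--         q = old_r // r
--         old_r, r = r, old_r - q * r
--         old_s, s = s, old_s - q * s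
--     if old_r != 1:
--         return -1
--     return old_s % m
--
-- def pointAddition(x1, y1, x2, y2, a, b, mod):
--     if x1 == x2 and y1 == y2:
--         beta = (3 * x1 * x1 + a) * _modularInverseOrMinusOne(2 * y1, mod)
--     else:
--         beta = (y2 - y1) * _modularInverseOrMinusOne(x2 - x1, mod)
--     x3 = beta * beta - x1 - x2
--     y3 = beta * (x1 - x3) - y1
--     return x3 % mod, y3 % mod
-- ===== Notes on version B (the rewrite author's own statement) =====
-- stated objective: faster
-- what changed: B computes the modular inverse with the extended Euclidean algorithm instead of A's linear search over all residues (and drops the dead normalisation while-loops).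
-- outside the precondition, e.g. on pointAddition(0, 0, 2, 0, 0, 0, -2): A returns (0, 0), B returns (0, 0)
import Mathlib
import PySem

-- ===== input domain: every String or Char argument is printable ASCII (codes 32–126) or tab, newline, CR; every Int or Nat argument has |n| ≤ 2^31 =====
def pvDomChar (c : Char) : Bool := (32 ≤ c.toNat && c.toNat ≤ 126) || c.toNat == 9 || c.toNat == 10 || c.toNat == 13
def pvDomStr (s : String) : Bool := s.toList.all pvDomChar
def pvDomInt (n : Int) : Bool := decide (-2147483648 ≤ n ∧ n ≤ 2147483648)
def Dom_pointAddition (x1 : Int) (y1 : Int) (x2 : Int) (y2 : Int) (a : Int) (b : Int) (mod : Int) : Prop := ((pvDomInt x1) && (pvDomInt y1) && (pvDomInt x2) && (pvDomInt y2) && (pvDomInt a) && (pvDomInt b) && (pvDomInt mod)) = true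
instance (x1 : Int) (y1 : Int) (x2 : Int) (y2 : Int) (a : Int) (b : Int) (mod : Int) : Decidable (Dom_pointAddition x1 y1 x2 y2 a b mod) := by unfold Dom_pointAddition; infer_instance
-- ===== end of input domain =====

-- B replaces A's O(mod) linear search for a modular inverse by the extended Euclidean
-- algorithm (O(log mod)); everything else is computed the same way. Objective: faster.


-- ===== PORT A =====
-- for x in range(1, m): if (a*x) % m == 1: return x ;; return -1
def findModularInverse (a m : Int) : Int :=
  (((PySem.List.pyRange 1 m 1).find? (fun x => PySem.Int.mod (a * x) m == 1)).getD (-1))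

-- while (x3 < 0): x3 = x3 + mod  — the 'm ≤ 0' test only makes the function total:
-- there the Python loop diverges (such inputs are outside Pre_pointAddition).
def bumpLoop (x m : Int) : Int :=
  if x < 0 then (if m ≤ 0 then x else bumpLoop (x + m) m) else x
termination_by (-x).toNat
decreasing_by omega

def pointAddition (x1 : Int) (y1 : Int) (x2 : Int) (y2 : Int) (a : Int) (b : Int) (mod : Int) : List Int :=
  let beta :=
    if x1 == x2 && y1 == y2 then
      (3 * x1 * x1 + a) * findModularInverse (2 * y1) mod
    else
      (y2 - y1) * findModularInverse (x2 - x1) mod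
  let x3 := beta * beta - x1 - x2
  let y3 := beta * (x1 - x3) - y1
  let x3 := PySem.Int.mod x3 mod
  let y3 := PySem.Int.mod y3 mod
  let x3 := bumpLoop x3 mod
  let y3 := bumpLoop y3 mod
  [x3, y3]

-- ===== PORT B =====
-- termination bound for the extended-Euclid loop (cited by egcdLoop's decreasing_by)
theorem pvMod_natAbs_lt (a c : Int) (h : c ≠ 0) : (PySem.Int.mod a c).natAbs < c.natAbs := by
  rcases lt_or_gt_of_ne h with hc | hc
  · have e := PySem.Int.mod_neg_neg (-a) (-c)
    rw [neg_neg, neg_neg] at e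
    have h1 : PySem.Int.mod (-a) (-c) = (-a) % (-c) := PySem.Int.mod_eq_emod_of_pos (by omega)
    have h2 := Int.emod_nonneg (-a) (by omega : (-c) ≠ 0)
    have h3 := Int.emod_lt_of_pos (-a) (by omega : 0 < -c)
    omega
  · rw [PySem.Int.mod_eq_emod_of_pos hc]
    have h2 := Int.emod_nonneg a (by omega : c ≠ 0)
    have h3 := Int.emod_lt_of_pos a hc
    omega

-- while r != 0: q = old_r // r; old_r, r = r, old_r - q*r; old_s, s = s, old_s - q*s
def egcdLoop (oldr r olds s : Int) : Int × Int :=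
  if h : r = 0 then (oldr, olds)
  else
    let q := PySem.Int.floordiv oldr r
    egcdLoop r (oldr - q * r) s (olds - q * s)
termination_by r.natAbs
decreasing_by
  have e : oldr - PySem.Int.floordiv oldr r * r = PySem.Int.mod oldr r := by
    have := PySem.Int.floordiv_mul_add_mod oldr r; omega
  simpa [e] using pvMod_natAbs_lt oldr r h

def modularInverseOrMinusOne (v m : Int) : Int :=
  if m ≤ 1 then -1
  else
    let p := egcdLoop (PySem.Int.mod v m) m 1 0
    if p.1 ≠ 1 then -1 else PySem.Int.mod p.2 m

def pointAddition_alt (x1 : Int) (y1 : Int) (x2 : Int) (y2 : Int) (a : Int) (b : Int) (mod : Int) : List Int :=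
  let beta :=
    if x1 == x2 && y1 == y2 then
      (3 * x1 * x1 + a) * modularInverseOrMinusOne (2 * y1) mod
    else
      (y2 - y1) * modularInverseOrMinusOne (x2 - x1) mod
  let x3 := beta * beta - x1 - x2
  let y3 := beta * (x1 - x3) - y1
  [PySem.Int.mod x3 mod, PySem.Int.mod y3 mod]

-- ===== PRECONDITION & SPEC =====
-- Pre_ excludes mod = 0, where Python A raises ZeroDivisionError, and mod < -1, where A's
-- normalisation while-loops diverge on almost every input; the rare mod < -1 inputs whose two
-- remainders both happen to be 0 (so A returns) are excluded together with them.
def Pre_pointAddition (x1 : Int) (y1 : Int) (x2 : Int) (y2 : Int) (a : Int) (b : Int) (mod : Int) : Prop := 0 < mod ∨ mod = -1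
instance (x1 : Int) (y1 : Int) (x2 : Int) (y2 : Int) (a : Int) (b : Int) (mod : Int) : Decidable (Pre_pointAddition x1 y1 x2 y2 a b mod) := by unfold Pre_pointAddition; infer_instance

def pvWitness_pointAddition : Int × Int × Int × Int × Int × Int × Int := (5, 1, 6, 3, 2, 7, 17)

def Spec_pointAddition (x1 : Int) (y1 : Int) (x2 : Int) (y2 : Int) (a : Int) (b : Int) (mod : Int) (out : List Int) : Prop := out = pointAddition_alt x1 y1 x2 y2 a b mod
instance (x1 : Int) (y1 : Int) (x2 : Int) (y2 : Int) (a : Int) (b : Int) (mod : Int) (out : List Int) : Decidable (Spec_pointAddition x1 y1 x2 y2 a b mod out) := by unfold Spec_pointAddition; infer_instance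

-- ===== CLAIM (what is proved, stated in full; the proofs are below) =====
def Claim_equal_pointAddition : Prop := ∀ (x1 : Int) (y1 : Int) (x2 : Int) (y2 : Int) (a : Int) (b : Int) (mod : Int), Dom_pointAddition x1 y1 x2 y2 a b mod → Pre_pointAddition x1 y1 x2 y2 a b mod → Spec_pointAddition x1 y1 x2 y2 a b mod (pointAddition x1 y1 x2 y2 a b mod)

-- ===== LEMMAS AND PROOFS =====

-- the first result component of the loop is nonnegative when both inputs are
theorem egcdLoop_fst_nonneg (oldr r olds s : Int) (ho : 0 ≤ oldr) (hr : 0 ≤ r) :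
    0 ≤ (egcdLoop oldr r olds s).1 := by
  induction oldr, r, olds, s using egcdLoop.induct with
  | case1 oldr olds s => simpa [egcdLoop] using ho
  | case2 oldr r olds s h q ih =>
    rw [egcdLoop, dif_neg h]
    have hr' : 0 < r := lt_of_le_of_ne hr (Ne.symm h)
    have e : oldr - q * r = PySem.Int.mod oldr r := by
      have := PySem.Int.floordiv_mul_add_mod oldr r; simp only [q]; omega
    have hnn : 0 ≤ oldr - q * r := by
      rw [e, PySem.Int.mod_eq_emod_of_pos hr']
      exact Int.emod_nonneg oldr (by omega)
    exact ih hr hnn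

-- the first result component divides both inputs
theorem egcdLoop_fst_dvd (oldr r olds s : Int) :
    (egcdLoop oldr r olds s).1 ∣ oldr ∧ (egcdLoop oldr r olds s).1 ∣ r := by
  induction oldr, r, olds, s using egcdLoop.induct with
  | case1 oldr olds s => simp [egcdLoop]
  | case2 oldr r olds s h q ih =>
    rw [egcdLoop, dif_neg h]
    obtain ⟨d1, d2⟩ := ih
    refine ⟨?_, d1⟩
    have hh := dvd_add d2 (Dvd.dvd.mul_left d1 q)
    rwa [sub_add_cancel] at hh

-- Bézout-style invariant, tracking only the s column
theorem egcdLoop_bezout (v m oldr r olds s : Int)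
    (h1 : m ∣ olds * v - oldr) (h2 : m ∣ s * v - r) :
    m ∣ (egcdLoop oldr r olds s).2 * v - (egcdLoop oldr r olds s).1 := by
  induction oldr, r, olds, s using egcdLoop.induct with
  | case1 oldr olds s => simpa [egcdLoop] using h1
  | case2 oldr r olds s h q ih =>
    rw [egcdLoop, dif_neg h]
    refine ih h2 ?_
    have : (olds - q * s) * v - (oldr - q * r) = (olds * v - oldr) - q * (s * v - r) := by ring
    rw [this]
    exact dvd_sub h1 (Dvd.dvd.mul_left h2 q)

theorem find?_eq_some_of_unique {p : Int → Bool} {l : List Int} {x0 : Int}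
    (hmem : x0 ∈ l) (huniq : ∀ x ∈ l, p x = true ↔ x = x0) : l.find? p = some x0 := by
  induction l with
  | nil => cases hmem
  | cons y t ih =>
    by_cases hy : p y = true
    · have e : y = x0 := (huniq y (List.mem_cons_self)).1 hy
      rw [List.find?_cons_of_pos hy, e]
    · have hyx : y ≠ x0 := fun e => hy ((huniq y List.mem_cons_self).2 e)
      have hx0t : x0 ∈ t := by
        rcases List.mem_cons.1 hmem with e | ht
        · exact absurd e.symm hyx
        · exact ht
      rw [List.find?_cons_of_neg (by simp [hy])]
      exact ih hx0t (fun x hx => huniq x (List.mem_cons_of_mem y hx))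

-- the heart of the file: the linear search and the extended Euclid agree for every positive modulus
theorem inverse_agree (v m : Int) (hm : 0 < m) :
    findModularInverse v m = modularInverseOrMinusOne v m := by
  by_cases hm1 : 1 < m
  case neg =>
    -- m = 1: the search range is empty and extended Euclid takes the m ≤ 1 branch
    have h1 : m = 1 := by omega
    subst h1
    simp [findModularInverse, modularInverseOrMinusOne, PySem.List.pyRange_one_eq_nil (le_refl (1 : Int))]
  case pos =>
    -- 1 < m
    have hv'e : PySem.Int.mod v m = v % m := PySem.Int.mod_eq_emod_of_pos hm
    set v' : Int := PySem.Int.mod v m with hv'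
    set res := egcdLoop v' m 1 0 with hres
    have hg0 : 0 ≤ res.1 :=
      egcdLoop_fst_nonneg v' m 1 0 (by rw [hv'e]; exact Int.emod_nonneg v (by omega)) (le_of_lt hm)
    have hbez : m ∣ res.2 * v' - res.1 :=
      egcdLoop_bezout v' m v' m 1 0 (by simp) (by simp)
    have hdvd := egcdLoop_fst_dvd v' m 1 0
    have hvv' : m ∣ v - v' := ⟨v / m, by rw [hv'e, Int.emod_def]; ring⟩
    have h1m : (1 : Int) % m = 1 := Int.emod_eq_of_lt (by norm_num) hm1
    have hpred : ∀ x : Int, ((PySem.Int.mod (v * x) m == 1) = true) ↔ m ∣ v * x - 1 := by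
      intro x
      rw [beq_iff_eq, PySem.Int.mod_eq_emod_of_pos hm, ← h1m,
        Int.emod_eq_emod_iff_emod_sub_eq_zero, ← Int.dvd_iff_emod_eq_zero, h1m]
    by_cases hg : res.1 = 1
    · -- an inverse exists; A's first hit is B's Euclid result
      have hx0e : PySem.Int.mod res.2 m = res.2 % m := PySem.Int.mod_eq_emod_of_pos hm
      set x0 : Int := PySem.Int.mod res.2 m with hx0
      have hx0nn : 0 ≤ x0 := by rw [hx0e]; exact Int.emod_nonneg res.2 (by omega)
      have hx0lt : x0 < m := by rw [hx0e]; exact Int.emod_lt_of_pos res.2 hm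
      have hsx : m ∣ res.2 - x0 := ⟨res.2 / m, by rw [hx0e, Int.emod_def]; ring⟩
      obtain ⟨k1, e1⟩ := hbez
      rw [hg] at e1
      obtain ⟨k2, e2⟩ := hvv'
      obtain ⟨k3, e3⟩ := hsx
      have hinv : m ∣ v * x0 - 1 :=
        ⟨k1 - k3 * v' + k2 * x0, by linear_combination e1 + x0 * e2 - v' * e3⟩
      have hx0ne : x0 ≠ 0 := by
        intro h0
        rw [h0, mul_zero, zero_sub] at hinv
        have hone : m ∣ (1 : Int) := dvd_neg.1 hinv
        have := Int.le_of_dvd one_pos hone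
        omega
      have hsv : m ∣ res.2 * v - 1 :=
        ⟨k1 + res.2 * k2, by linear_combination e1 + res.2 * e2⟩
      have huniq : ∀ x ∈ PySem.List.pyRange 1 m 1,
          ((PySem.Int.mod (v * x) m == 1) = true) ↔ x = x0 := by
        intro x hx
        rw [PySem.List.mem_pyRange_one] at hx
        rw [hpred x]
        constructor
        · intro hdx
          obtain ⟨k4, e4⟩ := hsv
          obtain ⟨k5, e5⟩ := hdx
          obtain ⟨k6, e6⟩ := hinv
          have hdiff : m ∣ x - x0 :=
            ⟨res.2 * (k5 - k6) - k4 * (x - x0),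
             by linear_combination res.2 * e5 - res.2 * e6 - (x - x0) * e4⟩
          have := Int.eq_zero_of_abs_lt_dvd hdiff (by rw [abs_lt]; omega)
          omega
        · rintro rfl; exact hinv
      have hfind : (PySem.List.pyRange 1 m 1).find?
          (fun x => PySem.Int.mod (v * x) m == 1) = some x0 := by
        apply find?_eq_some_of_unique
        · rw [PySem.List.mem_pyRange_one]; omega
        · exact huniq
      unfold findModularInverse modularInverseOrMinusOne
      rw [hfind]
      simp [not_le.2 hm1, ← hres, hg, ← hv', ← hx0]
    · -- no inverse: A's search finds nothing, B returns -1 from the gcd ≠ 1 branch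
      have hnone : (PySem.List.pyRange 1 m 1).find?
          (fun x => PySem.Int.mod (v * x) m == 1) = none := by
        rw [List.find?_eq_none]
        intro x hx hpx
        rw [hpred x] at hpx
        obtain ⟨k5, e5⟩ := hpx
        obtain ⟨a1, ea1⟩ := hdvd.1
        obtain ⟨a2, ea2⟩ := hdvd.2
        obtain ⟨k2, e2⟩ := hvv'
        have hone : res.1 ∣ 1 :=
          ⟨a1 * x + a2 * k2 * x - a2 * k5,
           by linear_combination x * ea1 + (k2 * x - k5) * ea2 + x * e2 - e5⟩
        exact hg (Int.eq_one_of_dvd_one hg0 hone)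
      unfold findModularInverse modularInverseOrMinusOne
      rw [hnone]
      simp [not_le.2 hm1, ← hres, hg, ← hv']

theorem mod_neg_one (z : Int) : PySem.Int.mod z (-1) = 0 := by
  have h := PySem.Int.mod_neg_neg (-z) 1
  rw [neg_neg] at h
  have h1 : PySem.Int.mod (-z) 1 = (-z) % 1 := PySem.Int.mod_eq_emod_of_pos one_pos
  rw [h, h1, Int.emod_one, neg_zero]

theorem bumpLoop_of_nonneg (x m : Int) (hx : 0 ≤ x) : bumpLoop x m = x := by
  unfold bumpLoop; simp [not_lt.mpr hx]

-- ===== VERDICT (by name: the statement is the Claim_ definition above) =====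
theorem pointAddition_spec : Claim_equal_pointAddition := by
  intro x1 y1 x2 y2 a b mod _ hpre
  unfold Spec_pointAddition pointAddition pointAddition_alt
  rcases hpre with hm | hm
  · rw [inverse_agree (2 * y1) mod hm, inverse_agree (x2 - x1) mod hm]
    have hb : ∀ z : Int, 0 ≤ PySem.Int.mod z mod := by
      intro z
      rw [PySem.Int.mod_eq_emod_of_pos hm]
      exact Int.emod_nonneg z (by omega)
    simp only [bumpLoop_of_nonneg _ mod (hb _)]
  · subst hm
    simp only [mod_neg_one, bumpLoop_of_nonneg 0 (-1) (le_refl 0)]
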